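-- pv_equiv track=rewrite | github.com/ayushree/UCD-Thesis | structured_perceptron.py | get_tag_seq
-- ===== SOURCE A (Python) =====
-- start_symbol = '*'
--
-- stop_symbol = 'STOP'
--
-- def get_tag_seq(address):
--     first_tag = start_symbol + "-" + start_symbol + "-" + (address[0].split("/"))[1]
--     second_tag = start_symbol + "-" + (address[0].split("/"))[1] + "-" + (address[1].split("/"))[1]
--     last_tag = (address[-2].split("/"))[1] + "-" + (address[-1].split("/"))[1] + "-" + stop_symbol
--     tag_seq = [first_tag, second_tag]
--     for i in range(len(address) - 2):
--         curr_tag = (address[i].split("/"))[1]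
--         next_tag = (address[i + 1].split("/"))[1]
--         next_to_next_tag = (address[i + 2].split("/"))[1]
--         curr_tag_seq = curr_tag + "-" + next_tag + "-" + next_to_next_tag
--         tag_seq.append(curr_tag_seq)
--     tag_seq.append(last_tag)
--     return tag_seq
-- ===== SOURCE B (Python) =====
-- start_symbol = '*'
--
-- stop_symbol = 'STOP'
--
-- def get_tag_seq(address):
--     tags = [t.split("/")[1] for t in address]
--     padded = [start_symbol, start_symbol] + tags + [stop_symbol]
--     return ["-".join(padded[i:i + 3]) for i in range(len(tags) + 1)]
-- ===== Notes on version B (the rewrite author's own statement) =====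
-- stated objective: simpler
-- what changed: Replaces A's three hand-written special cases (first, second, last trigram) plus an index-based middle loop by extracting all tags once, padding the tag list with two start markers and a stop marker, and emitting every trigram uniformly with one sliding window of width 3.
-- crash fix: On inputs with fewer than 2 tokens, each containing a slash, A raises IndexError via its fixed accesses to the first two and last two tokens, while B returns the padded trigram list. — e.g. on get_tag_seq(["a/B"]): A raises IndexError, B returns ["*-*-B", "*-B-STOP"]
import Mathlib
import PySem

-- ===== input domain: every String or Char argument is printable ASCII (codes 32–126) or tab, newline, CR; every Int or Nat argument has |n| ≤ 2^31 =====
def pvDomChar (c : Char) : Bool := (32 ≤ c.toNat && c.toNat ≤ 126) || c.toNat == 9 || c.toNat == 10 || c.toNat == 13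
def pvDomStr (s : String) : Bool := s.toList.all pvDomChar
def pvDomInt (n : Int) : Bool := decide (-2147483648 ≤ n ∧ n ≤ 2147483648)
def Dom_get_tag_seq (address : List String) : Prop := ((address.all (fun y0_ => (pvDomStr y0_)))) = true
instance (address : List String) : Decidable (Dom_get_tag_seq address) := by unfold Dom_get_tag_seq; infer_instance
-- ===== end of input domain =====

-- B builds the padded tag list once and emits every trigram with one uniform sliding window,
-- replacing A's three special cases plus middle index loop (same O(n) cost, simpler shape).

-- shared helper: Python's  t.split("/")[1]  (the index default "" is unreachable under Pre_)
def pvTag (t : String) : String :=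
  PySem.List.pyGetD ((PySem.Str.split? t "/").getD []) 1 ""

-- ===== PORT A =====
def get_tag_seq (address : List String) : List String :=
  let first_tag := "*" ++ "-" ++ "*" ++ "-" ++ pvTag (PySem.List.pyGetD address 0 "")
  let second_tag := "*" ++ "-" ++ pvTag (PySem.List.pyGetD address 0 "") ++ "-" ++ pvTag (PySem.List.pyGetD address 1 "")
  let last_tag := pvTag (PySem.List.pyGetD address (-2) "") ++ "-" ++ pvTag (PySem.List.pyGetD address (-1) "") ++ "-" ++ "STOP"
  let tag_seq := [first_tag, second_tag]
  let tag_seq := (PySem.List.pyRange 0 ((address.length : Int) - 2) 1).foldl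
    (fun acc i =>
      let curr_tag := pvTag (PySem.List.pyGetD address i "")
      let next_tag := pvTag (PySem.List.pyGetD address (i + 1) "")
      let next_to_next_tag := pvTag (PySem.List.pyGetD address (i + 2) "")
      acc ++ [curr_tag ++ "-" ++ next_tag ++ "-" ++ next_to_next_tag]) tag_seq
  tag_seq ++ [last_tag]

-- ===== PORT B =====
def get_tag_seq_alt (address : List String) : List String :=
  let tags := address.map pvTag
  let padded := ["*", "*"] ++ tags ++ ["STOP"]
  (PySem.List.pyRange 0 ((tags.length : Int) + 1) 1).map
    (fun i => PySem.Str.join "-" (PySem.List.slice padded (some i) (some (i + 3))))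

-- ===== PRECONDITION & SPEC =====
-- Pre_ excludes exactly the inputs on which A raises IndexError:
-- fewer than 2 tokens (address[1]/address[-2]) or a token without '/' (its split has no element 1).
def Pre_get_tag_seq (address : List String) : Prop :=
  2 ≤ address.length ∧ ∀ s ∈ address, '/' ∈ s.toList
instance (address : List String) : Decidable (Pre_get_tag_seq address) := by
  unfold Pre_get_tag_seq; infer_instance

def pvWitness_get_tag_seq : List String := ["the/DT", "big/JJ", "dog/NN"]

-- On inputs with fewer than 2 tokens, each containing a slash, A raises IndexError via its fixed accesses to the first two and last two tokens, while B returns the padded trigram list.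
def Raises_get_tag_seq (address : List String) : Prop :=
  address.length < 2 ∧ ∀ s ∈ address, '/' ∈ s.toList
instance (address : List String) : Decidable (Raises_get_tag_seq address) := by
  unfold Raises_get_tag_seq; infer_instance
def pvRaiseWitness_get_tag_seq : List String := ["a/B"]
def pvRaiseWitnessOut_get_tag_seq : List String := ["*-*-B", "*-B-STOP"]

def Spec_get_tag_seq (address : List String) (out : List String) : Prop := out = get_tag_seq_alt address
instance (address : List String) (out : List String) : Decidable (Spec_get_tag_seq address out) := by unfold Spec_get_tag_seq; infer_instance

-- ===== CLAIM (what is proved, stated in full; the proofs are below) =====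
def Claim_equal_get_tag_seq : Prop := ∀ (address : List String), Dom_get_tag_seq address → Pre_get_tag_seq address → Spec_get_tag_seq address (get_tag_seq address)
def Claim_raises_get_tag_seq : Prop := (∀ (address : List String), Dom_get_tag_seq address → Raises_get_tag_seq address → ¬ Pre_get_tag_seq address) ∧ (Dom_get_tag_seq (pvRaiseWitness_get_tag_seq) ∧ Raises_get_tag_seq (pvRaiseWitness_get_tag_seq) ∧ get_tag_seq_alt (pvRaiseWitness_get_tag_seq) = pvRaiseWitnessOut_get_tag_seq)

-- ===== LEMMAS AND PROOFS =====

-- a trigram "x-y-z" (the shape both ports build)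
def pvTrig (x y z : String) : String := x ++ "-" ++ y ++ "-" ++ z

-- all width-3 windows of a list, joined with "-"
def pvWins : List String → List String
  | x :: y :: z :: r => pvTrig x y z :: pvWins (y :: z :: r)
  | _ => []

-- the last two elements of x :: y :: m
def pvLast2 : String → String → List String → String × String
  | x, y, [] => (x, y)
  | _, y, z :: m => pvLast2 y z m

lemma pvTrig_eq (x y z : String) : x ++ "-" ++ y ++ "-" ++ z = pvTrig x y z := rfl

lemma pvJoin3 (x y z : String) : PySem.Str.join "-" [x, y, z] = pvTrig x y z := by
  rw [String.ext_iff]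
  simp [PySem.Str.toList_join, PySem.Chars.join_cons_cons, PySem.Chars.join_singleton, pvTrig]

lemma pvB_wins (p : List String) :
    (List.range (p.length - 2)).map (fun i => PySem.Str.join "-" ((p.drop i).take 3)) = pvWins p := by
  induction p using pvWins.induct with
  | case1 x y z r ih =>
      have h3 : (x :: y :: z :: r).length - 2 = r.length + 1 := by simp
      have h4 : (y :: z :: r).length - 2 = r.length := by simp
      rw [h3, List.range_succ_eq_map, List.map_cons, List.map_map, pvWins]
      rw [h4] at ih
      refine congrArg₂ _ ?_ ?_
      · simpa using pvJoin3 x y z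
      · rw [← ih]; simp [Function.comp]
  | case2 t h =>
      match t, h with
      | [], _ => simp [pvWins]
      | [x], _ => simp [pvWins]
      | [x, y], _ => simp [pvWins]
      | x :: y :: z :: r, h => exact (h x y z r rfl).elim

lemma pvA_wins (l : List String) :
    (List.range (l.length - 2)).map
      (fun i => pvTrig (pvTag (l.getD i "")) (pvTag (l.getD (i + 1) "")) (pvTag (l.getD (i + 2) ""))) =
      pvWins (l.map pvTag) := by
  induction l using pvWins.induct with
  | case1 x y z r ih =>
      have h3 : (x :: y :: z :: r).length - 2 = r.length + 1 := by simp
      have h4 : (y :: z :: r).length - 2 = r.length := by simp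
      rw [List.map_cons, List.map_cons, List.map_cons, pvWins,
          h3, List.range_succ_eq_map, List.map_cons, List.map_map]
      rw [h4] at ih
      simp only [List.map_cons] at ih
      refine congrArg₂ _ ?_ ?_
      · simp
      · rw [← ih]; simp [Function.comp]
  | case2 t h =>
      match t, h with
      | [], _ => simp [pvWins]
      | [x], _ => simp [pvWins]
      | [x, y], _ => simp [pvWins]
      | x :: y :: z :: r, h => exact (h x y z r rfl).elim

lemma pvWins_stop (m : List String) (x y : String) :
    pvWins ((x :: y :: m) ++ ["STOP"]) =
      pvWins (x :: y :: m) ++ [pvTrig (pvLast2 x y m).1 (pvLast2 x y m).2 "STOP"] := by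
  induction m generalizing x y with
  | nil => simp [pvWins, pvLast2]
  | cons z m ih =>
      simp only [List.cons_append, pvWins, pvLast2]
      rw [← List.cons_append, ← List.cons_append, ih y z]

lemma pvLast2_getD (m : List String) (x y : String) :
    pvLast2 x y m = ((x :: y :: m).getD m.length "", (x :: y :: m).getD (m.length + 1) "") := by
  induction m generalizing x y with
  | nil => simp [pvLast2]
  | cons z m ih => simpa [pvLast2] using ih y z

lemma pvTag_getD (l : List String) (k : Nat) :
    (l.map pvTag).getD k "" = pvTag (l.getD k "") := by
  induction l generalizing k with
  | nil => simp; rfl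
  | cons a l ih => cases k with
    | zero => simp
    | succ k => simpa using ih k

lemma pvGetD_neg (l : List String) (k : Nat) (hk : k ≠ 0) (hl : k ≤ l.length) :
    PySem.List.pyGetD l (-(k : Int)) "" = l.getD (l.length - k) "" := by
  unfold PySem.List.pyGetD PySem.List.pyGet? PySem.List.pyIdx?
  have h0 : ¬ (0 : Int) ≤ -(k : Int) := by omega
  have h1 : -((l.length : Int)) ≤ -(k : Int) := by omega
  rw [if_neg h0, if_pos h1]
  have h2 : (-(-(k : Int))).toNat = k := by omega
  rw [h2]
  have h3 : l.length - k < l.length := by omega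
  simp [List.getD, List.getElem?_eq_getElem h3]

-- A's index loop over range(len-2), as the window list
lemma pvA_int (l : List String) (h : 2 ≤ l.length) :
    (PySem.List.pyRange 0 ((l.length : Int) - 2) 1).map
      (fun i => pvTrig (pvTag (PySem.List.pyGetD l i ""))
        (pvTag (PySem.List.pyGetD l (i + 1) "")) (pvTag (PySem.List.pyGetD l (i + 2) ""))) =
      pvWins (l.map pvTag) := by
  rw [show ((l.length : Int) - 2) = ((l.length - 2 : Nat) : Int) by omega,
      PySem.List.pyRange_zero_nat, List.map_map, ← pvA_wins l]
  refine List.map_congr_left ?_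
  intro k _
  have e1 : (k : Int) + 1 = ((k + 1 : Nat) : Int) := by push_cast; ring
  have e2 : (k : Int) + 2 = ((k + 2 : Nat) : Int) := by push_cast; ring
  simp only [Function.comp_apply, e1, e2, PySem.List.pyGetD_natCast]

-- B's window comprehension over range(len(tags)+1), as the window list
lemma pvB_int (tags : List String) :
    (PySem.List.pyRange 0 ((tags.length : Int) + 1) 1).map
      (fun i => PySem.Str.join "-"
        (PySem.List.slice (["*", "*"] ++ tags ++ ["STOP"]) (some i) (some (i + 3)))) =
      pvWins (["*", "*"] ++ tags ++ ["STOP"]) := by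
  have hp : (["*", "*"] ++ tags ++ ["STOP"]).length - 2 = tags.length + 1 := by simp
  rw [show ((tags.length : Int) + 1) = ((tags.length + 1 : Nat) : Int) by push_cast; ring,
      PySem.List.pyRange_zero_nat, List.map_map, ← pvB_wins (["*", "*"] ++ tags ++ ["STOP"]), hp]
  refine List.map_congr_left ?_
  intro k _
  have e3 : (k : Int) + 3 = ((k + 3 : Nat) : Int) := by push_cast; ring
  rw [Function.comp_apply, e3,
      PySem.List.slice_toNat _ (by positivity) (by positivity)]
  simp only [Int.toNat_natCast]
  have h4 : k + 3 - k = 3 := by omega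
  rw [h4]

-- ===== VERDICT (by name: the statement is the Claim_ definition above) =====
theorem get_tag_seq_spec : Claim_equal_get_tag_seq := by
  intro address _ hpre
  obtain ⟨h2, -⟩ := hpre
  match address, h2 with
  | a0 :: a1 :: rest, _ =>
    unfold Spec_get_tag_seq get_tag_seq get_tag_seq_alt
    simp only [PySem.List.foldl_append_singleton_eq_map, pvTrig_eq]
    have hlen : (a0 :: a1 :: rest).length = rest.length + 2 := by simp
    have hmap : (a0 :: a1 :: rest).map pvTag = pvTag a0 :: pvTag a1 :: rest.map pvTag := by simp
    rw [pvA_int _ (by simp), pvB_int, hmap]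
    have hpad : ["*", "*"] ++ (pvTag a0 :: pvTag a1 :: rest.map pvTag) ++ ["STOP"] =
        "*" :: "*" :: pvTag a0 :: pvTag a1 :: (rest.map pvTag ++ ["STOP"]) := by simp
    rw [hpad, pvWins, pvWins]
    rw [show pvTag a0 :: pvTag a1 :: (List.map pvTag rest ++ ["STOP"]) =
          (pvTag a0 :: pvTag a1 :: List.map pvTag rest) ++ ["STOP"] from by simp,
        pvWins_stop, pvLast2_getD]
    have hg0 : PySem.List.pyGetD (a0 :: a1 :: rest) 0 "" = a0 := by
      have e : (0 : Int) ≤ (rest.length : Int) + 1 := by positivity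
      simp [PySem.List.pyGetD, PySem.List.pyGet?, PySem.List.pyIdx?, e]
    have hg1 : PySem.List.pyGetD (a0 :: a1 :: rest) 1 "" = a1 := by
      have e2 : (0 : Int) ≤ (rest.length : Int) := by positivity
      simp [PySem.List.pyGetD, PySem.List.pyGet?, PySem.List.pyIdx?, e2]
    have hn2 : PySem.List.pyGetD (a0 :: a1 :: rest) (-2) "" =
        (a0 :: a1 :: rest).getD rest.length "" := by
      have := pvGetD_neg (a0 :: a1 :: rest) 2 (by omega) (by simp)
      simpa [hlen] using this
    have hn1 : PySem.List.pyGetD (a0 :: a1 :: rest) (-1) "" =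
        (a0 :: a1 :: rest).getD (rest.length + 1) "" := by
      have := pvGetD_neg (a0 :: a1 :: rest) 1 (by omega) (by simp)
      simpa [hlen] using this
    have hm : (rest.map pvTag).length = rest.length := by simp
    rw [hg0, hg1, hn2, hn1, hm]
    have ht1 : (pvTag a0 :: pvTag a1 :: rest.map pvTag).getD rest.length "" =
        pvTag ((a0 :: a1 :: rest).getD rest.length "") := by
      simpa using pvTag_getD (a0 :: a1 :: rest) rest.length
    have ht2 : (pvTag a0 :: pvTag a1 :: rest.map pvTag).getD (rest.length + 1) "" =
        pvTag ((a0 :: a1 :: rest).getD (rest.length + 1) "") := by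
      simpa using pvTag_getD (a0 :: a1 :: rest) (rest.length + 1)
    rw [ht1, ht2]
    simp [pvTrig]

@[simp]
theorem get_tag_seq_raises : Claim_raises_get_tag_seq := by
  unfold Claim_raises_get_tag_seq
  refine ⟨?_, by decide⟩
  rintro address _ ⟨h, _⟩ ⟨h2, _⟩
  omega
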